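-- pv_equiv track=rewrite | github.com/MrBrantCode/unitest_baseline | mut_generate/mist_train_cf/cf_53370/solution.py | firstAndLastUnique
-- ===== SOURCE A (Python) =====
-- import collections
--
-- def firstAndLastUnique(s):
--     count = collections.Counter(s)
--     first_unique = -1
--     last_unique = -1
--     for idx, ch in enumerate(s):
--         if count[ch] == 1:
--             if first_unique == -1: # First unique character
--                 first_unique = idx
--             last_unique = idx # Keep updating. Will finally hold last unique character
--     return [first_unique, last_unique]
-- ===== SOURCE B (Python) =====
-- import collections
--
-- def firstAndLastUnique(s):
--     count = collections.Counter(s)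
--     first_unique = -1
--     for idx, ch in enumerate(s):
--         if count[ch] == 1:
--             first_unique = idx
--             break
--     last_unique = -1
--     for idx in range(len(s) - 1, -1, -1):
--         if count[s[idx]] == 1:
--             last_unique = idx
--             break
--     return [first_unique, last_unique]
-- ===== Notes on version B (the rewrite author's own statement) =====
-- stated objective: alternative
-- what changed: Replaces A's single combined sweep maintaining two running variables with two independent early-exit directional scans: a forward scan breaking at the first unique character and a backward scan over range(len(s)-1,-1,-1) breaking at the last one.
import Mathlib
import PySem

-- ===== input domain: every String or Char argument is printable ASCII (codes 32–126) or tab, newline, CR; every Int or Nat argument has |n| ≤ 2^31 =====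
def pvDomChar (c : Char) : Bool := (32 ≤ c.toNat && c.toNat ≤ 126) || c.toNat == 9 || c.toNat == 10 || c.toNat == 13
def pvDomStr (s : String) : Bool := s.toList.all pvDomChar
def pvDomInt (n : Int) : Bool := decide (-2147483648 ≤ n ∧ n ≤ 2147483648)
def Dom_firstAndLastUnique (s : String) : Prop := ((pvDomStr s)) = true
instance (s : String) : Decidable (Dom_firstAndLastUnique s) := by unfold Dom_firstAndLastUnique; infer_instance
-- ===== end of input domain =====

-- B replaces A's single combined sweep (two running variables) by two independent
-- early-exit directional scans (forward for the first unique, backward for the last).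

-- ===== PORT A =====
-- count = Counter(s); single enumerate loop maintaining (first_unique, last_unique)
def firstAndLastUnique (s : String) : List Int :=
  let count := PySem.Dict.counter s.toList
  let st := (PySem.List.enumerate s.toList 0).foldl
    (fun (st : Int × Int) (p : Int × Char) =>
      if count.getD p.2 0 == 1 then
        ((if st.1 == -1 then p.1 else st.1), p.1)
      else st) (-1, -1)
  [st.1, st.2]

-- ===== PORT B =====
-- forward scan: break at the first index whose count is 1
def pvScanFwd (count : PySem.Dict Char Int) : List Char → Int → Int
  | [], _ => -1
  | c :: rest, i => if count.getD c 0 == 1 then i else pvScanFwd count rest (i + 1)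

-- backward scan over range(len(s)-1, -1, -1): break at the first (= overall last) unique index
def pvScanBwd (count : PySem.Dict Char Int) : List Char → Int → Int
  | [], _ => -1
  | c :: rest, i => if count.getD c 0 == 1 then i else pvScanBwd count rest (i - 1)

def firstAndLastUnique_alt (s : String) : List Int :=
  let count := PySem.Dict.counter s.toList
  let first := pvScanFwd count s.toList 0
  let last := pvScanBwd count s.toList.reverse (PySem.Str.len s - 1)
  [first, last]

-- ===== PRECONDITION & SPEC =====
def Spec_firstAndLastUnique (s : String) (out : List Int) : Prop := out = firstAndLastUnique_alt s
instance (s : String) (out : List Int) : Decidable (Spec_firstAndLastUnique s out) := by unfold Spec_firstAndLastUnique; infer_instance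

-- ===== CLAIM (what is proved, stated in full; the proofs are below) =====
def Claim_equal_firstAndLastUnique : Prop := ∀ (s : String), Dom_firstAndLastUnique s → Spec_firstAndLastUnique s (firstAndLastUnique s)

-- ===== LEMMAS AND PROOFS =====

-- the list of unique-character indices, in order, starting at n
def pvIdxs (p : Char → Bool) : List Char → Int → List Int
  | [], _ => []
  | c :: t, n => (if p c then [n] else []) ++ pvIdxs p t (n + 1)

def pvStepA (p : Char → Bool) (st : Int × Int) (q : Int × Char) : Int × Int :=
  if p q.2 then ((if st.1 == -1 then q.1 else st.1), q.1) else st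

lemma pvGetLastD_cons (L : List Int) (a b : Int) :
    (a :: L).getLast?.getD b = L.getLast?.getD a := by
  rw [← List.getLastD_eq_getLast?, ← List.getLastD_eq_getLast?, List.getLastD_cons]

lemma pvFoldA (p : Char → Bool) (l : List Char) (n : Int) (hn : 0 ≤ n) (a b : Int) :
    (PySem.List.enumerate l n).foldl (pvStepA p) (a, b)
      = ((if a = -1 then (pvIdxs p l n).headD a else a), (pvIdxs p l n).getLastD b) := by
  induction l generalizing n a b with
  | nil => simp [pvIdxs, PySem.List.enumerate_nil]
  | cons c t ih =>
    rw [PySem.List.enumerate_cons]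
    simp only [List.foldl_cons, pvIdxs]
    by_cases hp : p c
    · have hstep : pvStepA p (a, b) (n, c) = ((if a == -1 then n else a), n) := by
        simp [pvStepA, hp]
      rw [hstep, ih (n + 1) (by omega)]
      have hne : n ≠ -1 := by omega
      by_cases ha : a = -1
      · simp [ha, hne, hp, pvGetLastD_cons]
      · simp [ha, hp, pvGetLastD_cons]
    · have hstep : pvStepA p (a, b) (n, c) = (a, b) := by simp [pvStepA, hp]
      rw [hstep, ih (n + 1) (by omega)]
      simp [hp]

lemma pvFwd (p : Char → Bool) (count : PySem.Dict Char Int)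
    (hc : ∀ c, p c = (count.getD c 0 == 1)) (l : List Char) (n : Int) :
    pvScanFwd count l n = (pvIdxs p l n).headD (-1) := by
  induction l generalizing n with
  | nil => simp [pvScanFwd, pvIdxs]
  | cons c t ih =>
    by_cases hp : p c
    · have := hc c; simp [pvScanFwd, pvIdxs, hp, ← this]
    · have := hc c; simp [pvScanFwd, pvIdxs, hp, ← this, ih]

lemma pvBwdAppend (count : PySem.Dict Char Int) (u v : List Char) (i : Int) :
    pvScanBwd count (u ++ v) i
      = (if ∀ c ∈ u, (count.getD c 0 == 1) = false
         then pvScanBwd count v (i - u.length) else pvScanBwd count u i) := by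
  induction u generalizing i with
  | nil => simp
  | cons c t ih =>
    by_cases hp : (count.getD c 0 == 1) = true
    · have hcond : ¬ ∀ x ∈ c :: t, (count.getD x 0 == 1) = false := by
        intro h; have := h c (List.mem_cons_self ..); rw [hp] at this; exact absurd this (by simp)
      rw [if_neg hcond]
      simp [pvScanBwd, hp]
    · have hp' : (count.getD c 0 == 1) = false := by simpa using hp
      have hstep : ∀ m : List Char, pvScanBwd count (c :: m) i = pvScanBwd count m (i - 1) := by
        intro m; simp [pvScanBwd, hp']
      by_cases hall : ∀ x ∈ t, (count.getD x 0 == 1) = false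
      · have hcond : ∀ x ∈ c :: t, (count.getD x 0 == 1) = false := by
          intro x hx
          rcases List.mem_cons.mp hx with rfl | hx
          · exact hp'
          · exact hall x hx
        rw [List.cons_append, hstep, ih, if_pos hall, if_pos hcond]
        congr 1
        simp only [List.length_cons]
        push_cast
        ring
      · have hcond : ¬ ∀ x ∈ c :: t, (count.getD x 0 == 1) = false := by
          intro h; exact hall (fun x hx => h x (List.mem_cons_of_mem _ hx))
        rw [List.cons_append, hstep, ih, if_neg hall, if_neg hcond, hstep]

lemma pvIdxs_eq_nil (p : Char → Bool) (l : List Char) (h : ∀ c ∈ l, p c = false) (n : Int) :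
    pvIdxs p l n = [] := by
  induction l generalizing n with
  | nil => rfl
  | cons c t ih =>
    have hc : p c = false := h c (List.mem_cons_self ..)
    simp [pvIdxs, hc, ih (fun x hx => h x (List.mem_cons_of_mem _ hx))]

lemma pvIdxs_ne_nil (p : Char → Bool) (l : List Char) (x : Char) (hx : x ∈ l)
    (hpx : p x = true) (n : Int) : pvIdxs p l n ≠ [] := by
  induction l generalizing n with
  | nil => simp at hx
  | cons c t ih =>
    rcases List.mem_cons.mp hx with rfl | hmem
    · simp [pvIdxs, hpx]
    · simp only [pvIdxs]
      intro hemp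
      rcases List.append_eq_nil_iff.mp hemp with ⟨-, h2⟩
      exact ih hmem (n + 1) h2

lemma pvBwd (p : Char → Bool) (count : PySem.Dict Char Int)
    (hc : ∀ c, p c = (count.getD c 0 == 1)) (l : List Char) (n : Int) :
    pvScanBwd count l.reverse (n + l.length - 1) = (pvIdxs p l n).getLastD (-1) := by
  induction l generalizing n with
  | nil => simp [pvScanBwd, pvIdxs]
  | cons c t ih =>
    rw [List.reverse_cons, pvBwdAppend]
    by_cases hall : ∀ x ∈ t, p x = false
    · have hall' : ∀ x ∈ t.reverse, (count.getD x 0 == 1) = false := by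
        intro x hx; rw [← hc]; exact hall x (by simpa using hx)
      have hidx : pvIdxs p t (n + 1) = [] := pvIdxs_eq_nil p t hall (n + 1)
      have harith : (n + ((c :: t).length : Int) - 1) - (t.reverse.length : Int) = n := by
        simp only [List.length_cons, List.length_reverse]; push_cast; ring
      rw [if_pos hall', harith]
      by_cases hp : p c
      · have := hc c; simp [pvScanBwd, pvIdxs, hp, ← this, hidx]
      · have := hc c; simp [pvScanBwd, pvIdxs, hp, ← this, hidx]
    · rw [not_forall] at hall
      simp only [not_forall, exists_prop] at hall
      obtain ⟨x, hx, hpx⟩ := hall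
      have hpx' : p x = true := by simpa using hpx
      have hcond : ¬ ∀ y ∈ t.reverse, (count.getD y 0 == 1) = false := by
        intro h
        have := h x (by simpa using hx)
        rw [← hc, hpx'] at this
        exact absurd this (by simp)
      rw [if_neg hcond]
      have harith : n + ((c :: t).length : Int) - 1 = (n + 1) + t.length - 1 := by
        simp only [List.length_cons]; push_cast; ring
      rw [harith, ih (n + 1)]
      have hne : pvIdxs p t (n + 1) ≠ [] := pvIdxs_ne_nil p t x hx hpx' (n + 1)
      have hlast : (pvIdxs p (c :: t) n).getLast? = (pvIdxs p t (n + 1)).getLast? := by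
        simp only [pvIdxs]
        exact List.getLast?_append_of_ne_nil _ hne
      simp [List.getLastD_eq_getLast?, hlast]

-- ===== VERDICT (by name: the statement is the Claim_ definition above) =====
theorem firstAndLastUnique_spec : Claim_equal_firstAndLastUnique := by
  intro s _
  unfold Spec_firstAndLastUnique firstAndLastUnique firstAndLastUnique_alt
  have hc : ∀ c, (fun c => (PySem.Dict.counter s.toList).getD c 0 == 1) c
      = ((PySem.Dict.counter s.toList).getD c 0 == 1) := fun _ => rfl
  have hA : (PySem.List.enumerate s.toList 0).foldl
      (fun (st : Int × Int) (q : Int × Char) =>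
        if (PySem.Dict.counter s.toList).getD q.2 0 == 1 then
          ((if st.1 == -1 then q.1 else st.1), q.1)
        else st) (-1, -1)
      = ((if (-1 : Int) = -1 then
            (pvIdxs (fun c => (PySem.Dict.counter s.toList).getD c 0 == 1) s.toList 0).headD (-1)
          else -1),
         (pvIdxs (fun c => (PySem.Dict.counter s.toList).getD c 0 == 1) s.toList 0).getLastD (-1)) :=
    pvFoldA (fun c => (PySem.Dict.counter s.toList).getD c 0 == 1) s.toList 0 (le_refl 0) (-1) (-1)
  have hB := pvBwd (fun c => (PySem.Dict.counter s.toList).getD c 0 == 1)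
    (PySem.Dict.counter s.toList) hc s.toList 0
  have hF := pvFwd (fun c => (PySem.Dict.counter s.toList).getD c 0 == 1)
    (PySem.Dict.counter s.toList) hc s.toList 0
  have hlen : PySem.Str.len s - 1 = (0 : Int) + s.toList.length - 1 := by
    simp [PySem.Str.len_eq]
  rw [show ((0 : Int) + s.toList.length - 1) = PySem.Str.len s - 1 from hlen.symm] at hB
  simp only [hA, hB, hF]
  simp
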